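-- pv_equiv track=rewrite | github.com/thauu-01/AI_exercise | no_observation.py | actions_in_belief_state
-- ===== SOURCE A (Python) =====
-- BOARD_SIZE = 3
--
-- MOVES = [(-1, 0), (1, 0), (0, -1), (0, 1)]
--
-- def find_blank(state):
--     state = list(state)
--     for i in range(len(state)):
--         if state[i] == 0:
--             return i // BOARD_SIZE, i % BOARD_SIZE
--     return None
--
-- def is_valid(x, y):
--     return 0 <= x < BOARD_SIZE and 0 <= y < BOARD_SIZE
--
-- def actions_in_belief_state(belief_state):
--     """Lấy tập hợp các hành động hợp lệ trong belief state (giao của tất cả hành động)."""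
--     possible_actions = set(range(len(MOVES)))
--     for state in belief_state:
--         blank_i, blank_j = find_blank(state)
--         state_actions = set()
--         for action_idx, (dx, dy) in enumerate(MOVES):
--             new_x, new_y = blank_i + dx, blank_j + dy
--             if is_valid(new_x, new_y):
--                 state_actions.add(action_idx)
--         possible_actions &= state_actions
--     return list(possible_actions)
-- ===== SOURCE B (Python) =====
-- BOARD_SIZE = 3
--
-- MOVES = [(-1, 0), (1, 0), (0, -1), (0, 1)]
--
-- def find_blank(state):
--     state = list(state)
--     for i in range(len(state)):
--         if state[i] == 0:
--             return i // BOARD_SIZE, i % BOARD_SIZE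
--     return None
--
-- def is_valid(x, y):
--     return 0 <= x < BOARD_SIZE and 0 <= y < BOARD_SIZE
--
-- def actions_in_belief_state(belief_state):
--     """Bounding-box reduction: each move's validity is a conjunction of interval
--     constraints on the blank's row and column separately, so it holds for every
--     state iff it holds at the extreme blank coordinates (min row, min col) and
--     (max row, max col).  One pass computes those four extremes; the moves are
--     then decided by two corner checks each, with no per-state/per-move loop."""
--     coords = [find_blank(state) for state in belief_state]
--     if not coords:
--         return list(range(len(MOVES)))
--     lo_r = min(r for r, _ in coords)
--     hi_r = max(r for r, _ in coords)
--     lo_c = min(c for _, c in coords)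
--     hi_c = max(c for _, c in coords)
--     result = []
--     for idx, (dx, dy) in enumerate(MOVES):
--         if is_valid(lo_r + dx, lo_c + dy) and is_valid(hi_r + dx, hi_c + dy):
--             result.append(idx)
--     return result
-- ===== Notes on version B (the rewrite author's own statement) =====
-- stated objective: alternative
-- what changed: Replaces the per-state set intersection with a bounding-box reduction: one pass extracts the min/max blank row and column, and each move is then decided by two corner validity checks, correct because each move's validity is a product of interval constraints on the row and column.
import Mathlib
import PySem

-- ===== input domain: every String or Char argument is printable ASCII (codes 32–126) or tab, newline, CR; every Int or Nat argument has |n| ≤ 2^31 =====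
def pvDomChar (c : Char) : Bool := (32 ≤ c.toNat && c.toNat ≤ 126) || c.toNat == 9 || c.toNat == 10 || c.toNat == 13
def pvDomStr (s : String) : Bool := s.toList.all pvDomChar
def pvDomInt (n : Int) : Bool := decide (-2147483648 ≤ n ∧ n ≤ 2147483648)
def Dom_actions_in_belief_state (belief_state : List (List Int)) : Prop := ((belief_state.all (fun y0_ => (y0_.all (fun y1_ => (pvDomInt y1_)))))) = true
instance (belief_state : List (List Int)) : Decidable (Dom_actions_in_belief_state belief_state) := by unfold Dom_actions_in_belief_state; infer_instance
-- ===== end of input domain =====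

-- B replaces A's per-state set intersection by a bounding-box reduction: one pass
-- extracts the extreme blank coordinates, then each move is decided by two corner
-- validity checks (objective: alternative).

-- ===== PORT A =====
def MOVES : List (Int × Int) := [(-1, 0), (1, 0), (0, -1), (0, 1)]

-- find_blank: first index of 0, as (i // 3, i % 3); None if absent
def find_blank_aux : List Int → Int → Option (Int × Int)
  | [], _ => none
  | x :: xs, i =>
    if x = 0 then some (PySem.Int.floordiv i 3, PySem.Int.mod i 3)
    else find_blank_aux xs (i + 1)

def find_blank (state : List Int) : Option (Int × Int) := find_blank_aux state 0

def is_valid (x y : Int) : Bool := decide (0 ≤ x ∧ x < 3 ∧ 0 ≤ y ∧ y < 3)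

-- Python A; 'list(possible_actions)': CPython sets of the ints 0..3 iterate in ascending
-- order, and possible_actions only ever holds such ints inserted ascending, so the
-- insertion-ordered PySem.Set is exact here.  The 'none' branch of find_blank is a
-- TypeError in Python (unpacking None) and is excluded by Pre_.
def actions_in_belief_state (belief_state : List (List Int)) : List Int :=
  belief_state.foldl
    (fun possible state =>
      match find_blank state with
      | some (blank_i, blank_j) =>
        let state_actions : PySem.Set Int :=
          (PySem.List.enumerate MOVES).foldl
            (fun sa p =>
              if is_valid (blank_i + p.2.1) (blank_j + p.2.2) then PySem.Set.add sa p.1 else sa)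
            PySem.Set.empty
        PySem.Set.inter possible state_actions
      | none => possible)
    (PySem.Set.ofList (PySem.List.pyRange 0 4 1))

-- ===== PORT B =====
-- Source B: coords of each blank, then min/max row and column, then two corner checks
-- per move.  find_blank = None raises in Python and is excluded by Pre_, so the
-- .getD (0, 0) default is never reached on admitted inputs.
def actions_in_belief_state_alt (belief_state : List (List Int)) : List Int :=
  let coords := belief_state.map (fun state => (find_blank state).getD (0, 0))
  if coords.isEmpty then PySem.List.pyRange 0 4 1
  else
    let lo_r := (PySem.List.min? (coords.map (fun p => p.1)) (fun x => x)).getD 0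
    let hi_r := (PySem.List.max? (coords.map (fun p => p.1)) (fun x => x)).getD 0
    let lo_c := (PySem.List.min? (coords.map (fun p => p.2)) (fun x => x)).getD 0
    let hi_c := (PySem.List.max? (coords.map (fun p => p.2)) (fun x => x)).getD 0
    (PySem.List.enumerate MOVES).foldl
      (fun res p =>
        if is_valid (lo_r + p.2.1) (lo_c + p.2.2) && is_valid (hi_r + p.2.1) (hi_c + p.2.2)
        then res ++ [p.1] else res)
      []

-- ===== PRECONDITION & SPEC =====
-- Pre_ excludes belief states containing a state without a 0 tile: there find_blank
-- returns None and both Python A and Python B raise TypeError unpacking it.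
def Pre_actions_in_belief_state (belief_state : List (List Int)) : Prop :=
  ∀ s ∈ belief_state, (0 : Int) ∈ s
instance (belief_state : List (List Int)) : Decidable (Pre_actions_in_belief_state belief_state) := by
  unfold Pre_actions_in_belief_state; infer_instance

def pvWitness_actions_in_belief_state : List (List Int) :=
  [[1, 2, 0, 3, 4, 5, 6, 7, 8], [0, 1, 2, 3, 4, 5, 6, 7, 8]]

def Spec_actions_in_belief_state (belief_state : List (List Int)) (out : List Int) : Prop := out = actions_in_belief_state_alt belief_state
instance (belief_state : List (List Int)) (out : List Int) : Decidable (Spec_actions_in_belief_state belief_state out) := by unfold Spec_actions_in_belief_state; infer_instance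

-- ===== CLAIM (what is proved, stated in full; the proofs are below) =====
def Claim_equal_actions_in_belief_state : Prop := ∀ (belief_state : List (List Int)), Dom_actions_in_belief_state belief_state → Pre_actions_in_belief_state belief_state → Spec_actions_in_belief_state belief_state (actions_in_belief_state belief_state)

-- ===== LEMMAS AND PROOFS =====

-- validity of move index a from blank (bi, bj)
def vmove (bi bj a : Int) : Bool :=
  if a = 0 then is_valid (bi + -1) bj
  else if a = 1 then is_valid (bi + 1) bj
  else if a = 2 then is_valid bi (bj + -1)
  else if a = 3 then is_valid bi (bj + 1)
  else false

-- per-state validity of move index a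
def okS (s : List Int) (a : Int) : Bool :=
  match find_blank s with
  | some (bi, bj) => vmove bi bj a
  | none => false

lemma fb_aux_some (s : List Int) (h : (0 : Int) ∈ s) (i : Int) :
    (find_blank_aux s i).isSome := by
  induction s generalizing i with
  | nil => simp at h
  | cons x xs ih =>
    rw [find_blank_aux]
    split
    · simp
    · rcases List.mem_cons.mp h with h' | h'
      · omega
      · exact ih h' _

lemma fb_some (s : List Int) (h : (0 : Int) ∈ s) :
    ∃ bi bj, find_blank s = some (bi, bj) := by
  have := fb_aux_some s h 0
  rcases hfb : find_blank_aux s 0 with _ | ⟨bi, bj⟩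
  · rw [hfb] at this; simp at this
  · exact ⟨bi, bj, hfb⟩

lemma sa_contains (bi bj a : Int) :
    (((PySem.List.enumerate MOVES).foldl
        (fun sa p =>
          if is_valid (bi + p.2.1) (bj + p.2.2) then PySem.Set.add sa p.1 else sa)
        PySem.Set.empty : PySem.Set Int).contains a) = vmove bi bj a := by
  simp only [MOVES, PySem.List.enumerate_cons, PySem.List.enumerate_nil, List.foldl]
  norm_num
  by_cases h0 : is_valid (bi + -1) bj <;>
  by_cases h1 : is_valid (bi + 1) bj <;>
  by_cases h2 : is_valid bi (bj + -1) <;>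
  by_cases h3 : is_valid bi (bj + 1) <;>
    simp [vmove, h0, h1, h2, h3, PySem.Set.add] <;>
    (by_cases ha0 : a = 0 <;> by_cases ha1 : a = 1 <;> by_cases ha2 : a = 2 <;>
      by_cases ha3 : a = 3 <;> simp_all)

lemma foldA (bs : List (List Int)) (hpre : ∀ s ∈ bs, (0 : Int) ∈ s) (init : List Int) :
    bs.foldl
      (fun possible state =>
        match find_blank state with
        | some (blank_i, blank_j) =>
          PySem.Set.inter possible
            ((PySem.List.enumerate MOVES).foldl
              (fun sa p =>
                if is_valid (blank_i + p.2.1) (blank_j + p.2.2) then PySem.Set.add sa p.1 else sa)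
              PySem.Set.empty)
        | none => possible)
      init = init.filter (fun a => bs.all (fun s => okS s a)) := by
  induction bs generalizing init with
  | nil => simp
  | cons s bs ih =>
    obtain ⟨bi, bj, hfb⟩ := fb_some s (hpre s (by simp))
    rw [List.foldl_cons]
    have hstep :
        (match find_blank s with
          | some (blank_i, blank_j) =>
            PySem.Set.inter init
              ((PySem.List.enumerate MOVES).foldl
                (fun sa p =>
                  if is_valid (blank_i + p.2.1) (blank_j + p.2.2) then PySem.Set.add sa p.1 else sa)
                PySem.Set.empty)
          | none => init) = init.filter (fun a => okS s a) := by
      rw [hfb]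
      show PySem.Set.inter init _ = _
      simp only [okS, hfb, PySem.Set.inter]
      exact List.filter_congr (fun a _ => sa_contains bi bj a)
    rw [hstep, ih (fun t ht => hpre t (by simp [ht])), List.filter_filter]
    congr 1
    funext a
    simp [Bool.and_comm]

-- all elements of xs lie in [l, h] iff its min and max do (min?/max? with identity key)
lemma all_interval (xs : List Int) (l h lo hi : Int)
    (hlo : PySem.List.min? xs (fun x => x) = some lo)
    (hhi : PySem.List.max? xs (fun x => x) = some hi) :
    (xs.all (fun x => decide (l ≤ x ∧ x ≤ h))) =
      (decide (l ≤ lo ∧ lo ≤ h) && decide (l ≤ hi ∧ hi ≤ h)) := by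
  have hlomem : lo ∈ xs := PySem.List.min?_mem hlo
  have hhimem : hi ∈ xs := PySem.List.max?_mem hhi
  have hloMin := PySem.List.min?_isMin hlo
  have hhiMax := PySem.List.max?_isMax hhi
  rw [Bool.eq_iff_iff]
  simp only [List.all_eq_true, decide_eq_true_eq, Bool.and_eq_true]
  constructor
  · intro hall
    exact ⟨hall lo hlomem, hall hi hhimem⟩
  · rintro ⟨⟨h1, _⟩, ⟨_, h4⟩⟩ x hx
    exact ⟨le_trans h1 (hloMin x hx), le_trans (hhiMax x hx) h4⟩

-- under Pre_, 'every state allows move a' reduces to interval checks on the extremes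
lemma all_ok (bs : List (List Int)) (hpre : ∀ s ∈ bs, (0 : Int) ∈ s)
    (a l1 h1 l2 h2 : Int)
    (hv : ∀ bi bj : Int, vmove bi bj a =
      (decide (l1 ≤ bi ∧ bi ≤ h1) && decide (l2 ≤ bj ∧ bj ≤ h2)))
    (lo_r hi_r lo_c hi_c : Int)
    (hlor : PySem.List.min? ((bs.map (fun s => (find_blank s).getD (0, 0))).map (fun p => p.1)) (fun x => x) = some lo_r)
    (hhir : PySem.List.max? ((bs.map (fun s => (find_blank s).getD (0, 0))).map (fun p => p.1)) (fun x => x) = some hi_r)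
    (hloc : PySem.List.min? ((bs.map (fun s => (find_blank s).getD (0, 0))).map (fun p => p.2)) (fun x => x) = some lo_c)
    (hhic : PySem.List.max? ((bs.map (fun s => (find_blank s).getD (0, 0))).map (fun p => p.2)) (fun x => x) = some hi_c) :
    bs.all (fun s => okS s a) = (vmove lo_r lo_c a && vmove hi_r hi_c a) := by
  have hcoord : bs.all (fun s => okS s a) =
      bs.all (fun s => vmove ((find_blank s).getD (0, 0)).1 ((find_blank s).getD (0, 0)).2 a) := by
    rw [Bool.eq_iff_iff]
    simp only [List.all_eq_true]
    constructor <;> intro hall s hs <;>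
      · obtain ⟨bi, bj, hfb⟩ := fb_some s (hpre s hs)
        have := hall s hs
        simp only [okS, hfb, Option.getD_some] at this ⊢
        exact this
  rw [hcoord]
  have hsplit : bs.all (fun s => vmove ((find_blank s).getD (0, 0)).1 ((find_blank s).getD (0, 0)).2 a) =
      (((bs.map (fun s => (find_blank s).getD (0, 0))).map (fun p => p.1)).all (fun x => decide (l1 ≤ x ∧ x ≤ h1)) &&
       ((bs.map (fun s => (find_blank s).getD (0, 0))).map (fun p => p.2)).all (fun x => decide (l2 ≤ x ∧ x ≤ h2))) := by
    simp only [List.all_map, Function.comp_def, hv]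
    rw [Bool.eq_iff_iff]
    simp only [List.all_eq_true, Bool.and_eq_true]
    constructor
    · intro hall
      exact ⟨fun s hs => (hall s hs).1, fun s hs => (hall s hs).2⟩
    · rintro ⟨hr, hc⟩ s hs
      exact ⟨hr s hs, hc s hs⟩
  rw [hsplit, all_interval _ _ _ _ _ hlor hhir, all_interval _ _ _ _ _ hloc hhic, hv, hv]
  rw [Bool.eq_iff_iff]
  simp only [Bool.and_eq_true]
  tauto

-- the four moves' validity as interval constraints on row and column
lemma vmove0 (bi bj : Int) : vmove bi bj 0 = (decide (1 ≤ bi ∧ bi ≤ 3) && decide (0 ≤ bj ∧ bj ≤ 2)) := by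
  simp only [vmove, is_valid]; rw [Bool.eq_iff_iff]; simp; omega
lemma vmove1 (bi bj : Int) : vmove bi bj 1 = (decide (-1 ≤ bi ∧ bi ≤ 1) && decide (0 ≤ bj ∧ bj ≤ 2)) := by
  simp only [vmove, is_valid]; norm_num; rw [Bool.eq_iff_iff]; simp; omega
lemma vmove2 (bi bj : Int) : vmove bi bj 2 = (decide (0 ≤ bi ∧ bi ≤ 2) && decide (1 ≤ bj ∧ bj ≤ 3)) := by
  simp only [vmove, is_valid]; norm_num; rw [Bool.eq_iff_iff]; simp; omega
lemma vmove3 (bi bj : Int) : vmove bi bj 3 = (decide (0 ≤ bi ∧ bi ≤ 2) && decide (-1 ≤ bj ∧ bj ≤ 1)) := by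
  simp only [vmove, is_valid]; norm_num; rw [Bool.eq_iff_iff]; simp; omega

-- ===== VERDICT (by name: the statement is the Claim_ definition above) =====
theorem actions_in_belief_state_spec : Claim_equal_actions_in_belief_state := by
  intro bs _ hpre
  unfold Spec_actions_in_belief_state actions_in_belief_state actions_in_belief_state_alt
  rw [foldA bs hpre]
  cases bs with
  | nil => decide
  | cons s bs' =>
    set t := s :: bs' with ht
    have hpre' : ∀ u ∈ t, (0 : Int) ∈ u := hpre
    simp only [List.isEmpty_map]
    rw [if_neg (show ¬ (t.isEmpty = true) by simp [ht])]
    have hne : (t.map (fun s => (find_blank s).getD (0, 0))).map (fun p => p.1) ≠ [] := by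
      simp [ht]
    have hne2 : (t.map (fun s => (find_blank s).getD (0, 0))).map (fun p => p.2) ≠ [] := by
      simp [ht]
    have hlor' : PySem.List.min? ((t.map (fun s => (find_blank s).getD (0, 0))).map (fun p => p.1)) (fun x => x) ≠ none :=
      fun h => hne ((PySem.List.min?_eq_none_iff _ _).mp h)
    have hhir' : PySem.List.max? ((t.map (fun s => (find_blank s).getD (0, 0))).map (fun p => p.1)) (fun x => x) ≠ none :=
      fun h => hne ((PySem.List.max?_eq_none_iff _ _).mp h)
    have hloc' : PySem.List.min? ((t.map (fun s => (find_blank s).getD (0, 0))).map (fun p => p.2)) (fun x => x) ≠ none :=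
      fun h => hne2 ((PySem.List.min?_eq_none_iff _ _).mp h)
    have hhic' : PySem.List.max? ((t.map (fun s => (find_blank s).getD (0, 0))).map (fun p => p.2)) (fun x => x) ≠ none :=
      fun h => hne2 ((PySem.List.max?_eq_none_iff _ _).mp h)
    obtain ⟨lo_r, hlor⟩ := Option.ne_none_iff_exists'.mp hlor'
    obtain ⟨hi_r, hhir⟩ := Option.ne_none_iff_exists'.mp hhir'
    obtain ⟨lo_c, hloc⟩ := Option.ne_none_iff_exists'.mp hloc'
    obtain ⟨hi_c, hhic⟩ := Option.ne_none_iff_exists'.mp hhic'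
    rw [hlor, hhir, hloc, hhic]
    simp only [Option.getD_some]
    have h0 := all_ok t hpre' 0 1 3 0 2 vmove0 lo_r hi_r lo_c hi_c hlor hhir hloc hhic
    have h1 := all_ok t hpre' 1 (-1) 1 0 2 vmove1 lo_r hi_r lo_c hi_c hlor hhir hloc hhic
    have h2 := all_ok t hpre' 2 0 2 1 3 vmove2 lo_r hi_r lo_c hi_c hlor hhir hloc hhic
    have h3 := all_ok t hpre' 3 0 2 (-1) 1 vmove3 lo_r hi_r lo_c hi_c hlor hhir hloc hhic
    have e0 : ((PySem.Set.ofList (PySem.List.pyRange 0 4 1)) : List Int) = [0, 1, 2, 3] := by decide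
    rw [e0]
    simp only [MOVES, PySem.List.enumerate_cons, PySem.List.enumerate_nil,
      List.foldl, List.filter, h0, h1, h2, h3]
    norm_num [vmove]
    rcases Bool.eq_false_or_eq_true (is_valid (lo_r + -1) lo_c) with b0 | b0 <;>
    rcases Bool.eq_false_or_eq_true (is_valid (hi_r + -1) hi_c) with b1 | b1 <;>
    rcases Bool.eq_false_or_eq_true (is_valid (lo_r + 1) lo_c) with b2 | b2 <;>
    rcases Bool.eq_false_or_eq_true (is_valid (hi_r + 1) hi_c) with b3 | b3 <;>
    rcases Bool.eq_false_or_eq_true (is_valid lo_r (lo_c + -1)) with b4 | b4 <;>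
    rcases Bool.eq_false_or_eq_true (is_valid hi_r (hi_c + -1)) with b5 | b5 <;>
    rcases Bool.eq_false_or_eq_true (is_valid lo_r (lo_c + 1)) with b6 | b6 <;>
    rcases Bool.eq_false_or_eq_true (is_valid hi_r (hi_c + 1)) with b7 | b7 <;>
      simp [b0, b1, b2, b3, b4, b5, b6, b7]
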